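-- pv_equiv track=rewrite | github.com/alasdairnicol/advent-of-code-2019 | day6.py | get_num_orbits
-- ===== SOURCE A (Python) =====
-- def get_num_orbits(obj, orbits, num_orbits):
--     if obj == "COM":
--         return 0
--     if obj not in num_orbits:
--         if obj == "COM":
--             num_orbits[obj] = 0
--         else:
--             num_orbits[obj] = get_num_orbits(orbits[obj], orbits, num_orbits) + 1
--     return num_orbits[obj]
-- ===== SOURCE B (Python) =====
-- def get_num_orbits(obj, orbits, num_orbits):
--     # Iterative rewrite of the memoized recursion: walk upward collecting the
--     # uncached chain, then backfill the cache downward. Performs the same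
--     # num_orbits mutations as the original (same keys, same values).
--     if obj == "COM":
--         return 0
--     path = []
--     cur = obj
--     while cur != "COM" and cur not in num_orbits:
--         path.append(cur)
--         cur = orbits[cur]
--     base = 0 if cur == "COM" else num_orbits[cur]
--     for node in reversed(path):
--         base += 1
--         num_orbits[node] = base
--     return base
-- ===== Notes on version B (the rewrite author's own statement) =====
-- stated objective: alternative
-- what changed: Replaces the memoized top-down recursion by an explicit iterative upward walk that collects the uncached chain and then backfills the cache downward, returning the running count (no recursion, no recursion-depth limit); the same num_orbits mutations are performed.
import Mathlib
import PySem

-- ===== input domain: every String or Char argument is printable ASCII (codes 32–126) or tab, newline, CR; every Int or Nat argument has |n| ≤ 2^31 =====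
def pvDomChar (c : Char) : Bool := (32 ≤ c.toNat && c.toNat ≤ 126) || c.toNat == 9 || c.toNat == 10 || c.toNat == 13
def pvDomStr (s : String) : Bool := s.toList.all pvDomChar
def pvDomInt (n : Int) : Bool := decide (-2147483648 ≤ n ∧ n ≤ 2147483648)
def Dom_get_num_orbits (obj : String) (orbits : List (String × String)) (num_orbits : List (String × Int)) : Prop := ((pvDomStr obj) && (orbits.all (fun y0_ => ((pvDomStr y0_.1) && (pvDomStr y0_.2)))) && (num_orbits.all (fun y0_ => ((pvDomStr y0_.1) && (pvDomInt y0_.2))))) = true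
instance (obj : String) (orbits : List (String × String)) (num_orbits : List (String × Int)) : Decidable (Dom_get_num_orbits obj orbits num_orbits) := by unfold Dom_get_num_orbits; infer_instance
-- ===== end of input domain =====

-- B replaces the memoized recursion by an explicit iterative upward walk with a downward
-- cache backfill (objective: alternative decomposition, no recursion). Both versions mutate
-- num_orbits identically in Python; the equivalence proved here is about the RETURN value.

-- dict lookup on an association list: first match (Python dict; callers' dicts have unique keys)
def pvLookup? {α : Type} (d : List (String × α)) (k : String) : Option α :=
  (d.find? (fun p => p.1 == k)).map (·.2)

-- ===== PORT A =====
-- literal transliteration of A; the recursion is fuelled (orbits.length + 1 suffices on every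
-- input Pre_ admits); dict assignment to a fresh key = append; fuel-out / KeyError branches
-- return 0 and are excluded by Pre_.
def goA (fuel : Nat) (obj : String) (orbits : List (String × String)) (d : List (String × Int)) : Int × List (String × Int) :=
  match fuel with
  | 0 => (0, d)
  | f + 1 =>
    if obj == "COM" then (0, d)
    else
      match pvLookup? d obj with
      | some v => (v, d)                -- obj in num_orbits: return num_orbits[obj]
      | none =>
        match pvLookup? orbits obj with
        | none => (0, d)                -- Python raises KeyError here; outside Pre_
        | some p =>
          let r := goA f p orbits d     -- recursive call sees the dict as it is now
          (r.1 + 1, r.2 ++ [(obj, r.1 + 1)])  -- num_orbits[obj] = … + 1; return num_orbits[obj]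

def get_num_orbits (obj : String) (orbits : List (String × String)) (num_orbits : List (String × Int)) : Int :=
  (goA (orbits.length + 1) obj orbits num_orbits).1

-- ===== PORT B =====
-- the upward while-loop of Source B, collecting the uncached chain (fuelled like goA)
def walkB (fuel : Nat) (cur : String) (orbits : List (String × String)) (d : List (String × Int)) (path : List String) : List String × String :=
  match fuel with
  | 0 => (path, cur)
  | f + 1 =>
    if cur == "COM" || (pvLookup? d cur).isSome then (path, cur)
    else
      match pvLookup? orbits cur with
      | none => (path, cur)             -- Python raises KeyError here; outside Pre_
      | some p => walkB f p orbits d (path ++ [cur])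

def get_num_orbits_alt (obj : String) (orbits : List (String × String)) (num_orbits : List (String × Int)) : Int :=
  if obj == "COM" then 0
  else
    let w := walkB (orbits.length + 1) obj orbits num_orbits []
    let base : Int := if w.2 == "COM" then 0 else (pvLookup? num_orbits w.2).getD 0
    -- the for-loop over reversed(path): base += 1; num_orbits[node] = base
    let fin := w.1.reverse.foldl (fun (s : Int × List (String × Int)) node => (s.1 + 1, s.2 ++ [(node, s.1 + 1)])) (base, num_orbits)
    fin.1

-- ===== PRECONDITION & SPEC =====
def pvStop (cur : String) (d : List (String × Int)) : Bool :=
  cur == "COM" || (pvLookup? d cur).isSome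

-- "COM or a cached object is reachable from cur in at most n orbit steps"
def pvReach (n : Nat) (cur : String) (orbits : List (String × String)) (d : List (String × Int)) : Bool :=
  match n with
  | 0 => pvStop cur d
  | m + 1 =>
    pvStop cur d ||
      (match pvLookup? orbits cur with
       | none => false
       | some p => pvReach m p orbits d)

-- Pre_ holds exactly when Python A returns: following the orbit chain from obj reaches "COM" or
-- a key of num_orbits (within orbits.length steps, which is always enough). Otherwise A raises
-- KeyError (chain leaves orbits) or recurses forever (a cycle); Pre_ excludes no input on which
-- A returns a value.
def Pre_get_num_orbits (obj : String) (orbits : List (String × String)) (num_orbits : List (String × Int)) : Prop :=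
  pvReach orbits.length obj orbits num_orbits = true

instance (obj : String) (orbits : List (String × String)) (num_orbits : List (String × Int)) : Decidable (Pre_get_num_orbits obj orbits num_orbits) := by
  unfold Pre_get_num_orbits; infer_instance

def pvWitness_get_num_orbits : String × (List (String × String)) × (List (String × Int)) :=
  ("A", [("A", "COM")], [])

def Spec_get_num_orbits (obj : String) (orbits : List (String × String)) (num_orbits : List (String × Int)) (out : Int) : Prop := out = get_num_orbits_alt obj orbits num_orbits
instance (obj : String) (orbits : List (String × String)) (num_orbits : List (String × Int)) (out : Int) : Decidable (Spec_get_num_orbits obj orbits num_orbits out) := by unfold Spec_get_num_orbits; infer_instance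

-- ===== CLAIM (what is proved, stated in full; the proofs are below) =====
def Claim_equal_get_num_orbits : Prop := ∀ (obj : String) (orbits : List (String × String)) (num_orbits : List (String × Int)), Dom_get_num_orbits obj orbits num_orbits → Pre_get_num_orbits obj orbits num_orbits → Spec_get_num_orbits obj orbits num_orbits (get_num_orbits obj orbits num_orbits)

-- ===== LEMMAS AND PROOFS =====

-- A's return value ignores the threaded dict (each recursive call receives the dict unchanged):
-- the first projection of goA equals this dict-free recursion.
def valA (fuel : Nat) (cur : String) (orbits : List (String × String)) (d : List (String × Int)) : Int :=
  match fuel with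
  | 0 => 0
  | f + 1 =>
    if cur == "COM" then 0
    else
      match pvLookup? d cur with
      | some v => v
      | none =>
        match pvLookup? orbits cur with
        | none => 0
        | some p => valA f p orbits d + 1

theorem fst_goA (fuel : Nat) (cur : String) (orbits : List (String × String)) (d : List (String × Int)) :
    (goA fuel cur orbits d).1 = valA fuel cur orbits d := by
  induction fuel generalizing cur with
  | zero => rfl
  | succ f ih =>
    simp only [goA, valA]
    split
    · rfl
    · cases pvLookup? d cur with
      | some v => rfl
      | none =>
        cases pvLookup? orbits cur with
        | none => rfl
        | some p => simpa using ih p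

-- the accumulator of walkB is a prefix of the final path
theorem walkB_acc (fuel : Nat) (cur : String) (orbits : List (String × String)) (d : List (String × Int)) (acc : List String) :
    walkB fuel cur orbits d acc = (acc ++ (walkB fuel cur orbits d []).1, (walkB fuel cur orbits d []).2) := by
  induction fuel generalizing cur acc with
  | zero => simp [walkB]
  | succ f ih =>
    simp only [walkB]
    split
    · simp
    · cases h : pvLookup? orbits cur with
      | none => simp
      | some p =>
        dsimp only
        simp only [List.nil_append]
        rw [ih p (acc ++ [cur]), ih p [cur]]
        simp

-- the backfill fold returns base + number of path nodes
theorem foldl_backfill (l : List String) (b : Int) (d : List (String × Int)) :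
    (l.foldl (fun (s : Int × List (String × Int)) node => (s.1 + 1, s.2 ++ [(node, s.1 + 1)])) (b, d)).1 = b + l.length := by
  induction l generalizing b d with
  | nil => simp
  | cons x xs ih => simp [List.foldl, ih]; ring

-- value of B's walk-and-count, as one expression
def bVal (fuel : Nat) (cur : String) (orbits : List (String × String)) (d : List (String × Int)) : Int :=
  (if (walkB fuel cur orbits d []).2 == "COM" then 0 else (pvLookup? d (walkB fuel cur orbits d []).2).getD 0)
    + ((walkB fuel cur orbits d []).1.length : Int)

theorem stop_case (f : Nat) (cur : String) (orbits : List (String × String)) (d : List (String × Int))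
    (h : pvStop cur d = true) : valA (f + 1) cur orbits d = bVal (f + 1) cur orbits d := by
  simp only [pvStop, Bool.or_eq_true, beq_iff_eq] at h
  simp only [valA, bVal, walkB]
  rcases h with h | h
  · simp [h]
  · rcases Option.isSome_iff_exists.mp h with ⟨v, hv⟩
    by_cases hc : cur = "COM"
    · simp [hc]
    · simp [hc, hv]

theorem main_lemma (n : Nat) (cur : String) (orbits : List (String × String)) (d : List (String × Int))
    (f : Nat) (hr : pvReach n cur orbits d = true) (hf : n < f) :
    valA f cur orbits d = bVal f cur orbits d := by
  induction n generalizing cur f with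
  | zero =>
    obtain ⟨g, rfl⟩ := Nat.exists_eq_add_of_lt hf
    simpa using stop_case g cur orbits d hr
  | succ m ih =>
    by_cases hs : pvStop cur d = true
    · obtain ⟨g, rfl⟩ := Nat.exists_eq_add_of_lt hf
      exact stop_case (m + 1 + g) cur orbits d hs
    · simp only [pvReach, hs, Bool.false_or] at hr
      cases hp : pvLookup? orbits cur with
      | none => simp [hp] at hr
      | some p =>
        simp only [hp] at hr
        obtain ⟨g, rfl⟩ := Nat.exists_eq_add_of_lt hf
        have hcom : ¬ (cur = "COM") := by
          intro h; apply hs; simp [pvStop, h]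
        have hnone : pvLookup? d cur = none := by
          cases hd : pvLookup? d cur with
          | none => rfl
          | some v => exact absurd (by simp [pvStop, hd]) hs
        have hstep : valA (m + 1 + g + 1) cur orbits d = valA (m + 1 + g) p orbits d + 1 := by
          simp [valA, hcom, hnone, hp]
        have hcond : (cur == "COM" || (pvLookup? d cur).isSome) = false := by
          simp [hcom, hnone]
        have hwB : bVal (m + 1 + g + 1) cur orbits d = bVal (m + 1 + g) p orbits d + 1 := by
          simp only [bVal, walkB, hcond, Bool.false_eq_true, if_false, hp, List.nil_append]
          rw [walkB_acc (m + 1 + g) p orbits d [cur]]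
          simp
          ring
        rw [hstep, hwB, ih p (m + 1 + g) hr (by omega)]

theorem alt_eq_bVal (obj : String) (orbits : List (String × String)) (num_orbits : List (String × Int))
    (h : ¬ (obj = "COM")) :
    get_num_orbits_alt obj orbits num_orbits = bVal (orbits.length + 1) obj orbits num_orbits := by
  simp only [get_num_orbits_alt, h, beq_iff_eq, if_false, bVal]
  rw [foldl_backfill]
  simp

-- ===== VERDICT (by name: the statement is the Claim_ definition above) =====
theorem get_num_orbits_spec : Claim_equal_get_num_orbits := by
  intro obj orbits num_orbits _ hpre
  unfold Spec_get_num_orbits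
  unfold get_num_orbits
  rw [fst_goA]
  by_cases h : obj = "COM"
  · subst h
    simp [valA, get_num_orbits_alt]
  · rw [alt_eq_bVal obj orbits num_orbits h]
    exact main_lemma orbits.length obj orbits num_orbits (orbits.length + 1) hpre (by omega)
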